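-- pv_equiv track=rewrite | github.com/seokwon99/CCPT | data/utils.py | select_elements_equally
-- ===== SOURCE A (Python) =====
-- def select_elements_equally(lists):
--     N = len(lists)
--
--     # 최소한 하나의 리스트가 존재해야 함
--     if N == 0:
--         return []
--
--     # 각 리스트에서 몇 개의 요소를 뽑아야 하는지 계산
--     num_elements_per_list = 5 // N
--     extra_elements = 5 % N
--
--     selected_elements = []
--
--     # 각 리스트에서 num_elements_per_list 개수만큼 요소를 뽑아 추가
--     for i in range(num_elements_per_list):
--         for lst in lists:
--             if len(lst) > i:
--                 selected_elements.append(lst[i])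
--
--     # 남은 요소를 각 리스트에서 하나씩 추가 (총 5개가 되도록)
--     for i in range(extra_elements):
--         if len(lists[i]) > num_elements_per_list:
--             selected_elements.append(lists[i][num_elements_per_list])
--
--     return selected_elements
-- ===== SOURCE B (Python) =====
-- def select_elements_equally(lists):
--     N = len(lists)
--     if N == 0:
--         return []
--     q, r = divmod(5, N)
--     # gather row-major: tag each kept element with its target rank col*N + j, then sort
--     picks = []
--     for j, lst in enumerate(lists):
--         take = q + 1 if j < r else q
--         for col, x in enumerate(lst[:take]):
--             picks.append((col * N + j, x))
--     picks.sort(key=lambda p: p[0])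
--     return [x for _, x in picks]
-- ===== Notes on version B (the rewrite author's own statement) =====
-- stated objective: alternative
-- what changed: A emits elements column-major with two staged index loops; B instead gathers row-major (one pass over the lists, taking each list's quota prefix), tags every kept element with its target rank col*N+j, and sorts by that rank to recover the column-major order.
import Mathlib
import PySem

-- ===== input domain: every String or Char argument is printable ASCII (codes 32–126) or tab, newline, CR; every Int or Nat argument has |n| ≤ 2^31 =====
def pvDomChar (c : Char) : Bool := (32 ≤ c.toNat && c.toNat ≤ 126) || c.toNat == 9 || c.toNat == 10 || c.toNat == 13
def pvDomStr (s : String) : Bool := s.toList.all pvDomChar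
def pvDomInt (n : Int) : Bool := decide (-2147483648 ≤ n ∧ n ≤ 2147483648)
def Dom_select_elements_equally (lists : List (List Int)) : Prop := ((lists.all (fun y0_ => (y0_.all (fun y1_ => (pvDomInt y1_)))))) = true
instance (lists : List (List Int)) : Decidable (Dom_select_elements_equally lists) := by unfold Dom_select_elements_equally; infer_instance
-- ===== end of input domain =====

-- B replaces A's two staged column-major index loops by a row-major gather (each list's
-- quota prefix, tagged with its target rank col*N+j) followed by a sort on the rank;
-- objective: alternative algorithm (gather-and-sort instead of staged column loops).

-- ===== PORT A =====
def select_elements_equally (lists : List (List Int)) : List Int :=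
  let N : Int := lists.length
  if N = 0 then []
  else
    let q := PySem.Int.floordiv 5 N
    let r := PySem.Int.mod 5 N
    let sel := (PySem.List.pyRange 0 q 1).foldl (fun acc i =>
        lists.foldl (fun acc lst =>
          if i < (lst.length : Int) then acc ++ [PySem.List.pyGetD lst i 0] else acc) acc) []
    (PySem.List.pyRange 0 r 1).foldl (fun acc i =>
        if q < ((PySem.List.pyGetD lists i []).length : Int) then
          acc ++ [PySem.List.pyGetD (PySem.List.pyGetD lists i []) q 0]
        else acc) sel

-- ===== PORT B =====
def select_elements_equally_alt (lists : List (List Int)) : List Int :=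
  let N : Int := lists.length
  if N = 0 then []
  else
    let q := PySem.Int.floordiv 5 N
    let r := PySem.Int.mod 5 N
    let picks := (PySem.List.enumerate lists).foldl (fun acc p =>
        (PySem.List.enumerate
            (PySem.List.slice p.2 none (some (if p.1 < r then q + 1 else q)))).foldl
          (fun acc2 c => acc2 ++ [(c.1 * N + p.1, c.2)]) acc) []
    (PySem.List.sorted picks (fun p => p.1)).map (fun p => p.2)

-- ===== PRECONDITION & SPEC =====
def Spec_select_elements_equally (lists : List (List Int)) (out : List Int) : Prop := out = select_elements_equally_alt lists
instance (lists : List (List Int)) (out : List Int) : Decidable (Spec_select_elements_equally lists out) := by unfold Spec_select_elements_equally; infer_instance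

-- ===== CLAIM (what is proved, stated in full; the proofs are below) =====
def Claim_equal_select_elements_equally : Prop := ∀ (lists : List (List Int)), Dom_select_elements_equally lists → Spec_select_elements_equally lists (select_elements_equally lists)

-- ===== LEMMAS AND PROOFS =====

-- per-list quota (B's 'take') and the one-element-or-empty cell at (col, j)
def pvTake (q r j : Int) : Int := if j < r then q + 1 else q

def pvF (lists : List (List Int)) (q r col j : Int) : List (Int × Int) :=
  if col < pvTake q r j ∧ col < ((PySem.List.pyGetD lists j ([] : List Int)).length : Int)
  then [(col * (lists.length : Int) + j,
         PySem.List.pyGetD (PySem.List.pyGetD lists j ([] : List Int)) col 0)]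
  else []

theorem pv_flatMap_congr_mem {α β : Type} (l : List α) (f g : α → List β)
    (h : ∀ x ∈ l, f x = g x) : l.flatMap f = l.flatMap g := by
  induction l with
  | nil => rfl
  | cons a t ih =>
    simp only [List.flatMap_cons, h a (List.mem_cons_self), ih (fun x hx => h x (List.mem_cons_of_mem a hx))]

theorem pv_flatMap_single {α β : Type} (l : List α) (g : α → β) :
    l.flatMap (fun i => [g i]) = l.map g := by
  induction l with
  | nil => rfl
  | cons a t ih => rw [List.flatMap_cons, ih, List.map_cons, List.singleton_append]

theorem pv_range_flatMap_ite {α : Type} (b m : Int) (h0 : 0 ≤ m) (hmb : m ≤ b)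
    (g : Int → α) :
    (PySem.List.pyRange 0 b 1).flatMap (fun i => if i < m then [g i] else [])
      = (PySem.List.pyRange 0 m 1).map g := by
  rw [PySem.List.pyRange_one_append 0 m b h0 hmb, List.flatMap_append]
  have h1 : (PySem.List.pyRange 0 m 1).flatMap (fun i => if i < m then [g i] else [])
      = (PySem.List.pyRange 0 m 1).flatMap (fun i => [g i]) := by
    apply pv_flatMap_congr_mem
    intro x hx
    rw [PySem.List.mem_pyRange_one] at hx
    simp [hx.2]
  have h2 : (PySem.List.pyRange m b 1).flatMap (fun i => if i < m then [g i] else [])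
      = (PySem.List.pyRange m b 1).flatMap (fun _ => ([] : List α)) := by
    apply pv_flatMap_congr_mem
    intro x hx
    rw [PySem.List.mem_pyRange_one] at hx
    have : ¬ x < m := by omega
    simp [this]
  rw [h1, h2, pv_flatMap_single]
  simp

theorem pv_coe_flatMap {α β : Type} (l : List α) (f : α → List β) :
    ((l.flatMap f : List β) : Multiset β) = (l : Multiset α).bind (fun a => (f a : Multiset β)) := by
  induction l with
  | nil => simp
  | cons a t ih => simp

theorem pv_flatMap_swap_perm {α β γ : Type} (l1 : List α) (l2 : List β) (f : α → β → List γ) :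
    (l1.flatMap fun a => l2.flatMap fun b => f a b).Perm
      (l2.flatMap fun b => l1.flatMap fun a => f a b) := by
  rw [← Multiset.coe_eq_coe]
  simp only [pv_coe_flatMap]
  exact Multiset.bind_bind _ _

theorem pv_pairwise_flatMap {α β : Type} (R : β → β → Prop) (l : List α) (f : α → List β)
    (hcross : List.Pairwise (fun a b => ∀ x ∈ f a, ∀ y ∈ f b, R x y) l)
    (hin : ∀ a ∈ l, List.Pairwise R (f a)) : List.Pairwise R (l.flatMap f) := by
  induction l with
  | nil => simp
  | cons a t ih =>
    rw [List.flatMap_cons, List.pairwise_append]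
    rw [List.pairwise_cons] at hcross
    obtain ⟨ha, ht⟩ := hcross
    refine ⟨hin a (List.mem_cons_self), ih ht (fun x hx => hin x (List.mem_cons_of_mem a hx)), ?_⟩
    intro x hx y hy
    rw [List.mem_flatMap] at hy
    obtain ⟨b, hb, hyb⟩ := hy
    exact ha b hb x hx y hyb

theorem pv_mem_f {lists : List (List Int)} {q r col j : Int} {x : Int × Int}
    (hx : x ∈ pvF lists q r col j) : x.1 = col * (lists.length : Int) + j := by
  unfold pvF at hx
  split at hx
  · simp at hx; rw [hx]
  · simp at hx

-- B's picks accumulator equals the row-major double flatMap of the cells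
theorem pv_picks_eq (lists : List (List Int)) (q r : Int) (hq0 : 0 ≤ q) :
    (PySem.List.enumerate lists).foldl (fun acc p =>
        (PySem.List.enumerate
            (PySem.List.slice p.2 none (some (if p.1 < r then q + 1 else q)))).foldl
          (fun acc2 c => acc2 ++ [(c.1 * (lists.length : Int) + p.1, c.2)]) acc) []
      = (PySem.List.pyRange 0 (lists.length : Int) 1).flatMap (fun j =>
          (PySem.List.pyRange 0 (q + 1) 1).flatMap (fun col => pvF lists q r col j)) := by
  rw [PySem.List.enumerate_eq_map_pyRange lists ([] : List Int), PySem.List.len_eq, List.foldl_map]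
  rw [PySem.List.foldl_congr_mem _ _
      (fun (acc : List (Int × Int)) (j : Int) =>
        acc ++ (PySem.List.pyRange 0 (q + 1) 1).flatMap (fun col => pvF lists q r col j)) _ ?_]
  · rw [PySem.List.foldl_append_eq_flatMap]
    rfl
  · intro acc j hj
    rw [PySem.List.mem_pyRange_one] at hj
    simp only
    rw [PySem.List.foldl_append_singleton_eq_map]
    congr 1
    -- the row of list j equals the flatMap of its cells over the columns 0..q
    set lst := PySem.List.pyGetD lists j ([] : List Int) with hlst
    have ht0 : 0 ≤ pvTake q r j := by unfold pvTake; split <;> omega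
    have htb : pvTake q r j ≤ q + 1 := by unfold pvTake; split <;> omega
    have hslice : PySem.List.slice lst none (some (if j < r then q + 1 else q))
        = lst.take (pvTake q r j).toNat := by
      rw [show (if j < r then q + 1 else q) = pvTake q r j from rfl]
      exact PySem.List.slice_to lst ht0
    rw [hslice, PySem.List.enumerate_eq_map_pyRange (lst.take (pvTake q r j).toNat) 0,
        PySem.List.len_eq, List.map_map]
    have hm : ((lst.take (pvTake q r j).toNat).length : Int)
        = min (pvTake q r j) ((lst.length : Int)) := by
      rw [List.length_take]
      push_cast
      omega
    have hcond : ∀ col : Int,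
        pvF lists q r col j
          = if col < min (pvTake q r j) ((lst.length : Int))
            then [(col * (lists.length : Int) + j, PySem.List.pyGetD lst col 0)] else [] := by
      intro col
      unfold pvF
      rw [← hlst]
      by_cases h : col < pvTake q r j ∧ col < (lst.length : Int)
      · have : col < min (pvTake q r j) ((lst.length : Int)) := lt_min h.1 h.2
        simp [h, this]
      · have : ¬ col < min (pvTake q r j) ((lst.length : Int)) := by
          rw [lt_min_iff]; exact h
        simp [h, this]
    rw [pv_flatMap_congr_mem _ _ _ (fun col _ => hcond col),
        pv_range_flatMap_ite (q + 1) _ (by positivity) (by omega)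
          (fun col => (col * (lists.length : Int) + j, PySem.List.pyGetD lst col 0)),
        hm]
    apply List.map_congr_left
    intro col hcol
    rw [PySem.List.mem_pyRange_one] at hcol
    have hcl2 : col < (lst.length : Int) := by
      have h2 := hcol.2
      rw [lt_min_iff] at h2
      exact h2.2
    have hcl1 : col < ((lst.take (pvTake q r j).toNat).length : Int) := by
      rw [hm]; exact hcol.2
    simp only [Function.comp_apply]
    rw [PySem.List.pyGetD_eq_getElem _ 0 hcol.1 hcl1,
        PySem.List.pyGetD_eq_getElem _ 0 hcol.1 hcl2]
    simp [List.getElem_take]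

-- A's staged loops equal (map snd) of the column-major double flatMap of the cells
theorem pv_A_eq (lists : List (List Int)) (q r : Int) (hq0 : 0 ≤ q) (hr0 : 0 ≤ r)
    (hrN : r ≤ (lists.length : Int)) :
    (PySem.List.pyRange 0 r 1).foldl (fun acc i =>
        if q < ((PySem.List.pyGetD lists i []).length : Int) then
          acc ++ [PySem.List.pyGetD (PySem.List.pyGetD lists i []) q 0]
        else acc)
      ((PySem.List.pyRange 0 q 1).foldl (fun acc i =>
        lists.foldl (fun acc lst =>
          if i < (lst.length : Int) then acc ++ [PySem.List.pyGetD lst i 0] else acc) acc) [])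
      = ((PySem.List.pyRange 0 (q + 1) 1).flatMap (fun col =>
          (PySem.List.pyRange 0 (lists.length : Int) 1).flatMap
            (fun j => pvF lists q r col j))).map (fun p => p.2) := by
  -- inner column loop as an append of a flatMap
  have hinner : ∀ (i : Int) (acc : List Int),
      lists.foldl (fun acc lst =>
          if i < (lst.length : Int) then acc ++ [PySem.List.pyGetD lst i 0] else acc) acc
        = acc ++ lists.flatMap (fun lst =>
            if i < (lst.length : Int) then [PySem.List.pyGetD lst i 0] else []) := by
    intro i acc
    rw [PySem.List.foldl_congr_mem _ _
        (fun (acc : List Int) (lst : List Int) =>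
          acc ++ (if i < (lst.length : Int) then [PySem.List.pyGetD lst i 0] else [])) _ ?_]
    · exact PySem.List.foldl_append_eq_flatMap _ _ _
    · intro a lst _
      split <;> simp [*]
  -- full-columns part
  have hfull : (PySem.List.pyRange 0 q 1).foldl (fun acc i =>
        lists.foldl (fun acc lst =>
          if i < (lst.length : Int) then acc ++ [PySem.List.pyGetD lst i 0] else acc) acc) []
      = (PySem.List.pyRange 0 q 1).flatMap (fun i =>
          lists.flatMap (fun lst =>
            if i < (lst.length : Int) then [PySem.List.pyGetD lst i 0] else [])) := by
    rw [PySem.List.foldl_congr_mem _ _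
        (fun (acc : List Int) (i : Int) =>
          acc ++ lists.flatMap (fun lst =>
            if i < (lst.length : Int) then [PySem.List.pyGetD lst i 0] else [])) _
        (fun a i _ => hinner i a)]
    rw [PySem.List.foldl_append_eq_flatMap]
    rfl
  -- extra part
  have hextra : ∀ acc : List Int,
      (PySem.List.pyRange 0 r 1).foldl (fun acc i =>
        if q < ((PySem.List.pyGetD lists i []).length : Int) then
          acc ++ [PySem.List.pyGetD (PySem.List.pyGetD lists i []) q 0]
        else acc) acc
      = acc ++ (PySem.List.pyRange 0 r 1).flatMap (fun i =>
          if q < ((PySem.List.pyGetD lists i []).length : Int) then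
            [PySem.List.pyGetD (PySem.List.pyGetD lists i []) q 0] else []) := by
    intro acc
    rw [PySem.List.foldl_congr_mem _ _
        (fun (acc : List Int) (i : Int) =>
          acc ++ (if q < ((PySem.List.pyGetD lists i []).length : Int) then
            [PySem.List.pyGetD (PySem.List.pyGetD lists i []) q 0] else [])) _ ?_]
    · exact PySem.List.foldl_append_eq_flatMap _ _ _
    · intro a i _
      split <;> simp [*]
  rw [hextra, hfull]
  -- RHS: push map inside, split the columns at q
  rw [List.map_flatMap,
      PySem.List.pyRange_one_append 0 q (q + 1) hq0 (by omega), List.flatMap_append,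
      PySem.List.pyRange_one_singleton, List.flatMap_cons, List.flatMap_nil, List.append_nil]
  congr 1
  -- full columns agree
  · apply pv_flatMap_congr_mem
    intro col hcol
    rw [PySem.List.mem_pyRange_one] at hcol
    rw [List.map_flatMap]
    conv_lhs => rw [← PySem.List.map_pyGetD_pyRange_zero' lists ([] : List Int), List.flatMap_map]
    apply pv_flatMap_congr_mem
    intro j hj
    rw [PySem.List.mem_pyRange_one] at hj
    unfold pvF
    have htake : col < pvTake q r j := by unfold pvTake; split <;> omega
    by_cases h : col < ((PySem.List.pyGetD lists j ([] : List Int)).length : Int)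
    · simp [h, htake]
    · simp [h, htake]
  -- extra column agrees
  · rw [List.map_flatMap,
        PySem.List.pyRange_one_append 0 r (lists.length : Int) hr0 hrN, List.flatMap_append]
    have hz : (PySem.List.pyRange r (lists.length : Int) 1).flatMap
        (fun j => (pvF lists q r q j).map (fun p => p.2)) = [] := by
      rw [pv_flatMap_congr_mem _ _ (fun _ => ([] : List Int)) ?_]
      · simp
      · intro j hj
        rw [PySem.List.mem_pyRange_one] at hj
        unfold pvF pvTake
        have : ¬ j < r := by omega
        simp [this]
    rw [hz, List.append_nil]
    apply pv_flatMap_congr_mem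
    intro j hj
    rw [PySem.List.mem_pyRange_one] at hj
    unfold pvF pvTake
    have hjr : j < r := hj.2
    by_cases h : q < ((PySem.List.pyGetD lists j ([] : List Int)).length : Int)
    · simp [h, hjr]
    · simp [h, hjr]

-- the column-major cell list has strictly increasing ranks
theorem pv_cm_pairwise (lists : List (List Int)) (q r : Int) :
    List.Pairwise (fun (a b : Int × Int) => a.1 < b.1)
      ((PySem.List.pyRange 0 (q + 1) 1).flatMap (fun col =>
        (PySem.List.pyRange 0 (lists.length : Int) 1).flatMap (fun j => pvF lists q r col j))) := by
  apply pv_pairwise_flatMap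
  · -- cross columns
    apply List.Pairwise.imp_of_mem (R := fun a b => a < b) ?_ (PySem.List.pairwise_lt_pyRange_one 0 (q + 1))
    intro c1 c2 _ _ hlt x hx y hy
    rw [List.mem_flatMap] at hx hy
    obtain ⟨j1, hj1, hx⟩ := hx
    obtain ⟨j2, hj2, hy⟩ := hy
    rw [PySem.List.mem_pyRange_one] at hj1 hj2
    rw [pv_mem_f hx, pv_mem_f hy]
    have h1 : c1 * (lists.length : Int) + j1 < (c1 + 1) * (lists.length : Int) := by
      rw [add_mul, one_mul]; omega
    have h2 : (c1 + 1) * (lists.length : Int) ≤ c2 * (lists.length : Int) :=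
      mul_le_mul_of_nonneg_right (by omega) (by omega)
    omega
  · -- within one column
    intro col _
    apply pv_pairwise_flatMap
    · apply List.Pairwise.imp_of_mem (R := fun a b => a < b) ?_ (PySem.List.pairwise_lt_pyRange_one 0 (lists.length : Int))
      intro j1 j2 _ _ hlt x hx y hy
      rw [pv_mem_f hx, pv_mem_f hy]
      omega
    · intro j _
      unfold pvF
      split <;> simp

-- ===== VERDICT (by name: the statement is the Claim_ definition above) =====
theorem select_elements_equally_spec : Claim_equal_select_elements_equally := by
  intro lists _
  unfold Spec_select_elements_equally select_elements_equally select_elements_equally_alt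
  by_cases hN : (lists.length : Int) = 0
  · simp [hN]
  · simp only [hN, if_false]
    have hNpos : 0 < (lists.length : Int) := by
      have := Int.natCast_nonneg lists.length; omega
    set q : Int := PySem.Int.floordiv 5 (lists.length : Int) with hq
    set r : Int := PySem.Int.mod 5 (lists.length : Int) with hrr
    have hq0 : 0 ≤ q := by
      rw [hq, PySem.Int.floordiv_eq_ediv_of_pos hNpos]
      exact Int.ediv_nonneg (by norm_num) (by omega)
    have hr0 : 0 ≤ r := by
      rw [hrr, PySem.Int.mod_eq_emod_of_pos hNpos]
      exact Int.emod_nonneg 5 (by omega)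
    have hrN : r < (lists.length : Int) := by
      rw [hrr, PySem.Int.mod_eq_emod_of_pos hNpos]
      exact Int.emod_lt_of_pos 5 hNpos
    rw [pv_picks_eq lists q r hq0]
    rw [PySem.List.sorted_eq_of_perm_of_pairwise_lt _ _ _
        (pv_flatMap_swap_perm (PySem.List.pyRange 0 (q + 1) 1)
          (PySem.List.pyRange 0 (lists.length : Int) 1) (fun col j => pvF lists q r col j))
        (pv_cm_pairwise lists q r)]
    exact pv_A_eq lists q r hq0 hr0 (le_of_lt hrN)
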